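-- pv_equiv track=rewrite | github.com/gaboza12/we-are-algorithm | 724thomas/Week7 DynamicProgramming1/15489.py | solution
-- ===== SOURCE A (Python) =====
-- def solution(r, c, v):
--     # 파스칼의 삼각형 생성
--     pascal = [[0] * (r + v) for _ in range(r + v)]
--     pascal[0][0] = 1
--
--     for i in range(1, r + v):
--         pascal[i][0] = 1
--         for j in range(1, i + 1):
--             pascal[i][j] = pascal[i-1][j-1] + pascal[i-1][j]
--
--     total_sum = 0
--     for i in range(r - 1, r - 1 + v):
--         for j in range(c - 1, c - 1 + (i - (r - 1)) + 1):
--             total_sum += pascal[i][j]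
--     return total_sum
-- ===== SOURCE B (Python) =====
-- def _comb(n, k):
--     if k < 0 or k > n:
--         return 0
--     num = 1
--     for i in range(k):
--         num = num * (n - i) // (i + 1)
--     return num
--
-- def solution(r, c, v):
--     total = 0
--     t0 = 0 if c >= 0 else (-c if -c < v else v)
--     x = _comb(r + v - 1, c + t0)
--     y = _comb(r + t0 - 1, c + t0)
--     for t in range(t0, v):
--         total += x - y
--         x = x * (r + v - 1 - c - t) // (c + t + 1)
--         y = y * (r + t) // (c + t + 1)
--     return total
-- ===== Notes on version B (the rewrite author's own statement) =====
-- stated objective: faster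
-- what changed: Instead of building the whole (r+v)x(r+v) Pascal triangle and summing the region cell by cell, B collapses each column of the sub-triangle with the hockey-stick identity into a difference of two binomial coefficients, maintained incrementally (one multiplication/exact division per column) across the loop.
-- intended difference: For region apexes left of or above Pascal's triangle (r <= 0 or c <= -1, with v >= 1, where A still returns), A silently wraps the negative row/column indices around its pre-allocated square array and sums unrelated entries, while B returns the intended sum of the region's genuine binomial coefficients (cells outside the triangle count 0). — e.g. on solution(0, 1, 2): A returns 2, B returns 1
import Mathlib
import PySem

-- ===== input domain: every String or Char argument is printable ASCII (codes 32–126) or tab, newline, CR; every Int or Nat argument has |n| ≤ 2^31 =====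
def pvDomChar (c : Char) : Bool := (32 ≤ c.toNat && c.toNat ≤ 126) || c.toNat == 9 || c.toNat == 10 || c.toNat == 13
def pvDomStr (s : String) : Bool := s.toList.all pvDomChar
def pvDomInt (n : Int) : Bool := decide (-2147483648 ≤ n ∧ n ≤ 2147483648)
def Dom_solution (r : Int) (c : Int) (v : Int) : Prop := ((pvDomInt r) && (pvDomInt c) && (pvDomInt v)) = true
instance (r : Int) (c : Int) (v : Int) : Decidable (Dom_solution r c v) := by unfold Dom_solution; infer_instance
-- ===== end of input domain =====

-- B changes the algorithm: instead of building the whole (r+v)x(r+v) Pascal triangle and summing the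
-- region cell by cell, it collapses each column of the sub-triangle with the hockey-stick identity into
-- a difference of two binomial coefficients maintained incrementally along the loop (objective: faster).

-- ===== PORT A =====
-- Helpers for A's in-place 2D-array construction.  Under Pre_solution every Python index used below is
-- non-negative and in range, so `List.getD _.toNat`/`List.set`/`List.modify` is exact for Python's
-- `pascal[i][j]` reads and writes (Python would raise IndexError only outside Pre_solution).
def pascalInit (n : Nat) : List (List Int) :=
  (List.replicate n (List.replicate n (0:Int))).modify 0 (fun row => row.set 0 1)

-- body of `pascal[i][j] = pascal[i-1][j-1] + pascal[i-1][j]`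
def pascalRowStep (i : Int) (p : List (List Int)) (j : Int) : List (List Int) :=
  p.modify i.toNat (fun row => row.set j.toNat
    ((p.getD (i-1).toNat []).getD (j-1).toNat 0 + (p.getD (i-1).toNat []).getD j.toNat 0))

-- body of the outer `for i in range(1, r + v)` loop
def pascalStep (p : List (List Int)) (i : Int) : List (List Int) :=
  (PySem.List.pyRange 1 (i+1) 1).foldl (pascalRowStep i) (p.modify i.toNat (fun row => row.set 0 1))

def pascalBuild (r : Int) (v : Int) : List (List Int) :=
  (PySem.List.pyRange 1 (r+v) 1).foldl pascalStep (pascalInit (r+v).toNat)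

def solution (r : Int) (c : Int) (v : Int) : Int :=
  let pascal := pascalBuild r v
  (PySem.List.pyRange (r-1) (r-1+v) 1).foldl (fun acc i =>
    (PySem.List.pyRange (c-1) (c-1 + (i-(r-1)) + 1) 1).foldl (fun acc j =>
      acc + PySem.List.pyGetD (PySem.List.pyGetD pascal i []) j 0) acc) 0

-- ===== PORT B =====
-- port of Source B's `_comb`: multiplicative loop, division exact at each step
def combB (n : Int) (k : Int) : Int :=
  if k < 0 || n < k then 0
  else (PySem.List.pyRange 0 k 1).foldl
    (fun num i => PySem.Int.floordiv (num * (n - i)) (i + 1)) 1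

def solution_alt (r : Int) (c : Int) (v : Int) : Int :=
  let t0 : Int := if 0 ≤ c then 0 else (if -c < v then -c else v)
  let x := combB (r + v - 1) (c + t0)
  let y := combB (r + t0 - 1) (c + t0)
  let s := (PySem.List.pyRange t0 v 1).foldl
    (fun st t => (st.1 + (st.2.1 - st.2.2),
                  PySem.Int.floordiv (st.2.1 * (r + v - 1 - c - t)) (c + t + 1),
                  PySem.Int.floordiv (st.2.2 * (r + t)) (c + t + 1))) (0, x, y)
  s.1

-- ===== PRECONDITION & SPEC =====
-- Pre_solution is exactly the closed-form condition under which Python A returns normally: the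
-- Pascal array is non-empty (1 ≤ r+v) and, when the region is non-empty (1 ≤ v), every row index
-- i ∈ [r-1, r+v-2] and column index j ∈ [c-1, c+v-2] used by the summing loops lies in the Python
-- index range [-(r+v), r+v-1]; outside Pre_ A raises IndexError.
def Pre_solution (r : Int) (c : Int) (v : Int) : Prop :=
  (v ≤ 0 ∧ 1 ≤ r + v) ∨
  (1 ≤ v ∧ 1 ≤ r + v ∧ -(r+v) ≤ r - 1 ∧ -(r+v) ≤ c - 1 ∧ c ≤ r + 1)
instance (r : Int) (c : Int) (v : Int) : Decidable (Pre_solution r c v) := by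
  unfold Pre_solution; infer_instance

-- On region apexes left of or above Pascal's triangle (r ≤ 0 or c ≤ -1, with v ≥ 1 and in Pre_),
-- A silently wraps the negative indices around the pre-allocated square array and sums unrelated
-- binomial entries, while B returns the intended sum of the region's genuine binomial coefficients
-- (cells outside the triangle counting 0).
def D_solution (r : Int) (c : Int) (v : Int) : Prop :=
  1 ≤ v ∧ 1 ≤ r + v ∧ -(r+v) ≤ r - 1 ∧ -(r+v) ≤ c - 1 ∧ c ≤ r + 1 ∧ (r ≤ 0 ∨ c ≤ -1)
instance (r : Int) (c : Int) (v : Int) : Decidable (D_solution r c v) := by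
  unfold D_solution; infer_instance

def pvWitness_solution : Int × Int × Int := (4, 2, 3)

def pvDiffWitness_solution : Int × Int × Int := (0, 1, 2)
def pvDiffWitnessOut_solution : Int × Int := (2, 1)

def Spec_solution (r : Int) (c : Int) (v : Int) (out : Int) : Prop :=
  ¬ D_solution r c v → out = solution_alt r c v
instance (r : Int) (c : Int) (v : Int) (out : Int) : Decidable (Spec_solution r c v out) := by
  unfold Spec_solution; infer_instance

-- ===== CLAIM (what is proved, stated in full; the proofs are below) =====
def Claim_unchanged_solution : Prop := ∀ (r : Int) (c : Int) (v : Int),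
  Dom_solution r c v → Pre_solution r c v → Spec_solution r c v (solution r c v)
def Claim_changed_solution : Prop :=
  Dom_solution (pvDiffWitness_solution.1) (pvDiffWitness_solution.2.1) (pvDiffWitness_solution.2.2) ∧
  Pre_solution (pvDiffWitness_solution.1) (pvDiffWitness_solution.2.1) (pvDiffWitness_solution.2.2) ∧
  D_solution (pvDiffWitness_solution.1) (pvDiffWitness_solution.2.1) (pvDiffWitness_solution.2.2) ∧
  solution (pvDiffWitness_solution.1) (pvDiffWitness_solution.2.1) (pvDiffWitness_solution.2.2) = pvDiffWitnessOut_solution.1 ∧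
  solution_alt (pvDiffWitness_solution.1) (pvDiffWitness_solution.2.1) (pvDiffWitness_solution.2.2) = pvDiffWitnessOut_solution.2 ∧
  pvDiffWitnessOut_solution.1 ≠ pvDiffWitnessOut_solution.2

-- ===== LEMMAS AND PROOFS =====

-- the row of binomial coefficients C(i, 0..n-1)
def rowB (n : Nat) (i : Nat) : List Int := (List.range n).map (fun j => ((i.choose j : Nat) : Int))

-- the matrix state after the outer loop has processed rows 1..m
def matB (n : Nat) (m : Nat) : List (List Int) :=
  (List.range n).map (fun i => if i ≤ m then rowB n i else List.replicate n (0:Int))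

-- row m+1 while the inner loop has filled entries 0..t
def prowB (n : Nat) (m : Nat) (t : Nat) : List Int :=
  (List.range n).map (fun j => if j ≤ t then (((m+1).choose j : Nat) : Int) else 0)

-- matrix state while the inner loop is filling row m+1
def matB' (n : Nat) (m : Nat) (t : Nat) : List (List Int) :=
  (List.range n).map (fun i =>
    if i ≤ m then rowB n i else if i = m+1 then prowB n m t else List.replicate n (0:Int))

theorem length_rowB (n i : Nat) : (rowB n i).length = n := by simp [rowB]

theorem rowB_getElem (n i j : Nat) (h : j < (rowB n i).length) :
    (rowB n i)[j] = ((i.choose j : Nat) : Int) := by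
  simp [rowB]

theorem prowB_getElem (n m t j : Nat) (h : j < (prowB n m t).length) :
    (prowB n m t)[j] = if j ≤ t then (((m+1).choose j : Nat) : Int) else 0 := by
  simp [prowB]

theorem matB_getElem (n m i : Nat) (h : i < (matB n m).length) :
    (matB n m)[i] = if i ≤ m then rowB n i else List.replicate n (0:Int) := by
  simp [matB]

theorem matB'_getElem (n m t i : Nat) (h : i < (matB' n m t).length) :
    (matB' n m t)[i]
      = if i ≤ m then rowB n i else if i = m+1 then prowB n m t else List.replicate n (0:Int) := by
  simp [matB']

theorem getD_rowB (n i j : Nat) (hj : j < n) : (rowB n i).getD j 0 = ((i.choose j : Nat) : Int) := by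
  rw [List.getD_eq_getElem _ _ (by simp [rowB, hj]), rowB_getElem n i j (by simp [rowB, hj])]

theorem getD_matB' (n m t i : Nat) (hi : i < n) :
    (matB' n m t).getD i []
      = if i ≤ m then rowB n i else if i = m+1 then prowB n m t else List.replicate n (0:Int) := by
  rw [List.getD_eq_getElem _ _ (by simp [matB', hi]), matB'_getElem n m t i (by simp [matB', hi])]

-- setting entry 0 of a zero row to 1 gives row 0 of the triangle
theorem set_zero_rowB (n : Nat) : (List.replicate n (0:Int)).set 0 1 = rowB n 0 := by
  apply List.ext_getElem (by simp [rowB])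
  intro j h1 h2
  rw [List.getElem_set, rowB_getElem n 0 j h2, List.getElem_replicate]
  cases j with
  | zero => simp
  | succ j => simp [Nat.choose]

theorem set_zero_prowB (n m : Nat) : (List.replicate n (0:Int)).set 0 1 = prowB n m 0 := by
  apply List.ext_getElem (by simp [prowB])
  intro j h1 h2
  rw [List.getElem_set, prowB_getElem n m 0 j h2, List.getElem_replicate]
  cases j with
  | zero => simp
  | succ j => simp

theorem prowB_set (n m t : Nat) :
    (prowB n m t).set (t+1) (((m.choose t : Nat) : Int) + ((m.choose (t+1) : Nat) : Int))
      = prowB n m (t+1) := by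
  apply List.ext_getElem (by simp [prowB])
  intro j h1 h2
  rw [List.getElem_set, prowB_getElem n m (t+1) j h2,
      prowB_getElem n m t j (by simpa using h1)]
  by_cases hjt : t + 1 = j
  · subst hjt
    rw [if_pos rfl, if_pos (Nat.le_refl (t+1)), Nat.choose_succ_succ m t]
    push_cast
    ring
  · rw [if_neg hjt]
    by_cases hle : j ≤ t
    · rw [if_pos hle, if_pos (by omega)]
    · rw [if_neg hle, if_neg (by omega)]

theorem prowB_last (n m : Nat) : prowB n m (m+1) = rowB n (m+1) := by
  apply List.ext_getElem (by simp [prowB, rowB])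
  intro j h1 h2
  rw [prowB_getElem n m (m+1) j h1, rowB_getElem n (m+1) j h2]
  by_cases hle : j ≤ m + 1
  · rw [if_pos hle]
  · rw [if_neg hle, Nat.choose_eq_zero_of_lt (by omega)]
    simp

theorem pascalInit_eq (n : Nat) : pascalInit n = matB n 0 := by
  apply List.ext_getElem (by simp [pascalInit, matB])
  intro i h1 h2
  rw [show (pascalInit n)[i] =
      ((List.replicate n (List.replicate n (0:Int))).modify 0 (fun row => row.set 0 1))[i]
      from rfl]
  rw [List.getElem_modify, matB_getElem n 0 i h2, List.getElem_replicate]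
  by_cases hi : 0 = i
  · subst hi
    rw [if_pos rfl, if_pos (Nat.le_refl 0), set_zero_rowB]
  · rw [if_neg hi, if_neg (by omega)]

theorem rowStep_eq (n m t : Nat) (hm : m + 1 < n) (ht : t + 1 ≤ m + 1) :
    pascalRowStep (1 + (m:Int)) (matB' n m t) (1 + (t:Int)) = matB' n m (t+1) := by
  have hi : ((1:Int) + m).toNat = m + 1 := by omega
  have hi1 : ((1:Int) + m - 1).toNat = m := by omega
  have hj : ((1:Int) + t).toNat = t + 1 := by omega
  have hj1 : ((1:Int) + t - 1).toNat = t := by omega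
  unfold pascalRowStep
  rw [hi, hi1, hj, hj1]
  rw [getD_matB' n m t m (by omega), if_pos (Nat.le_refl m)]
  rw [getD_rowB n m t (by omega), getD_rowB n m (t+1) (by omega)]
  apply List.ext_getElem (by simp [matB'])
  intro i h1 h2
  rw [List.getElem_modify, matB'_getElem n m (t+1) i h2]
  by_cases hieq : m + 1 = i
  · have hieq' := hieq.symm
    subst hieq'
    rw [if_pos rfl, matB'_getElem n m t (m+1) (by simp [matB']; omega)]
    rw [if_neg (by omega), if_pos rfl, if_neg (by omega), if_pos rfl, prowB_set]
  · rw [if_neg hieq, matB'_getElem n m t i (by simpa using h1)]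
    by_cases hle : i ≤ m
    · rw [if_pos hle, if_pos hle]
    · rw [if_neg hle, if_neg hle, if_neg (fun h => hieq h.symm), if_neg (fun h => hieq h.symm)]

theorem rowLoop_eq (n m : Nat) (hm : m + 1 < n) :
    ∀ t, t ≤ m + 1 →
      ((List.range t).map (fun s : Nat => (1:Int) + s)).foldl (pascalRowStep (1 + (m:Int))) (matB' n m 0)
        = matB' n m t := by
  intro t
  induction t with
  | zero => intro _; rfl
  | succ t ih =>
    intro ht
    rw [List.range_succ, List.map_append, List.foldl_append, ih (by omega)]
    simp only [List.map_cons, List.map_nil, List.foldl_cons, List.foldl_nil]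
    exact rowStep_eq n m t hm ht

theorem pascalStep_eq (n m : Nat) (hm : m + 1 < n) :
    pascalStep (matB n m) (1 + (m:Int)) = matB n (m+1) := by
  have hi : ((1:Int) + m).toNat = m + 1 := by omega
  unfold pascalStep
  rw [hi]
  have hmod : (matB n m).modify (m+1) (fun row => row.set 0 1) = matB' n m 0 := by
    apply List.ext_getElem (by simp [matB, matB'])
    intro i h1 h2
    rw [List.getElem_modify, matB'_getElem n m 0 i h2,
        matB_getElem n m i (by simpa using h1)]
    by_cases hieq : m + 1 = i
    · have hieq' := hieq.symm
      subst hieq'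
      rw [if_pos rfl, if_neg (by omega), if_neg (by omega), if_pos rfl, set_zero_prowB]
    · rw [if_neg hieq]
      by_cases hle : i ≤ m
      · rw [if_pos hle, if_pos hle]
      · rw [if_neg hle, if_neg hle, if_neg (fun h => hieq h.symm)]
  rw [hmod]
  have hrange : PySem.List.pyRange 1 (1 + (m:Int) + 1) 1
      = (List.range (m+1)).map (fun s : Nat => (1:Int) + s) := by
    rw [PySem.List.pyRange_one, show ((1:Int) + (m:Int) + 1 - 1).toNat = m + 1 by omega]
  rw [hrange, rowLoop_eq n m hm (m+1) (Nat.le_refl (m+1))]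
  apply List.ext_getElem (by simp [matB, matB'])
  intro i h1 h2
  rw [matB'_getElem n m (m+1) i h1, matB_getElem n (m+1) i h2]
  by_cases hle : i ≤ m
  · rw [if_pos hle, if_pos (by omega)]
  · rw [if_neg hle]
    by_cases hieq : i = m + 1
    · subst hieq
      rw [if_pos rfl, if_pos (Nat.le_refl (m+1)), prowB_last]
    · rw [if_neg hieq, if_neg (by omega)]

theorem buildLoop_eq (n : Nat) :
    ∀ m, m + 1 ≤ n →
      ((List.range m).map (fun k : Nat => (1:Int) + k)).foldl pascalStep (pascalInit n) = matB n m := by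
  intro m
  induction m with
  | zero => intro _; exact pascalInit_eq n
  | succ m ih =>
    intro hm
    rw [List.range_succ, List.map_append, List.foldl_append, ih (by omega)]
    simp only [List.map_cons, List.map_nil, List.foldl_cons, List.foldl_nil]
    exact pascalStep_eq n m (by omega)

theorem length_matB (n m : Nat) : (matB n m).length = n := by simp [matB]

theorem pascalBuild_eq (r v : Int) (h1 : 1 ≤ r + v) :
    pascalBuild r v = matB (r+v).toNat ((r+v).toNat - 1) := by
  unfold pascalBuild
  have hrange : PySem.List.pyRange 1 (r+v) 1
      = (List.range ((r+v).toNat - 1)).map (fun k : Nat => (1:Int) + k) := by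
    rw [PySem.List.pyRange_one, show ((r+v) - 1).toNat = (r+v).toNat - 1 by omega]
  rw [hrange, buildLoop_eq (r+v).toNat ((r+v).toNat - 1) (by omega)]

-- a cell of the built triangle, Python indexing, both indices non-negative
theorem pascalBuild_cell (r v : Int) (h1 : 1 ≤ r + v) (i j : Int)
    (hi0 : 0 ≤ i) (hi : i < r + v) (hj0 : 0 ≤ j) (hj : j < r + v) :
    PySem.List.pyGetD (PySem.List.pyGetD (pascalBuild r v) i []) j 0
      = ((i.toNat.choose j.toNat : Nat) : Int) := by
  rw [pascalBuild_eq r v h1,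
      PySem.List.pyGetD_eq_getElem _ _ hi0 (by rw [length_matB]; omega),
      matB_getElem _ _ _ (by rw [length_matB]; omega), if_pos (by omega),
      PySem.List.pyGetD_eq_getElem _ _ hj0 (by rw [length_rowB]; omega),
      rowB_getElem _ _ _ (by rw [length_rowB]; omega)]

-- Python's wrapped column -1 of the built triangle is zero above the last row
theorem pascalBuild_cell_neg1 (r v : Int) (h1 : 1 ≤ r + v) (i : Int)
    (hi0 : 0 ≤ i) (hi : i < r + v - 1) :
    PySem.List.pyGetD (PySem.List.pyGetD (pascalBuild r v) i []) (-1) 0 = 0 := by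
  rw [pascalBuild_eq r v h1,
      PySem.List.pyGetD_eq_getElem _ _ hi0 (by rw [length_matB]; omega),
      matB_getElem _ _ _ (by rw [length_matB]; omega), if_pos (by omega),
      PySem.List.pyGetD_neg_ofNat _ 1 0 (by omega) (by rw [length_rowB]; omega),
      rowB_getElem _ _ _ (by rw [length_rowB]; omega), length_rowB,
      Nat.choose_eq_zero_of_lt (by omega)]
  simp

-- B's multiplicative loop computes the binomial coefficient
theorem combB_loop (n : Int) (hn : 0 ≤ n) :
    ∀ m : Nat, m ≤ n.toNat →
      ((List.range m).map (fun t : Nat => (t : Int))).foldl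
        (fun num i => PySem.Int.floordiv (num * (n - i)) (i + 1)) 1
        = ((n.toNat.choose m : Nat) : Int) := by
  intro m
  induction m with
  | zero => intro _; simp
  | succ m ih =>
    intro hm
    rw [List.range_succ, List.map_append, List.foldl_append, ih (by omega)]
    simp only [List.map_cons, List.map_nil, List.foldl_cons, List.foldl_nil]
    have hnm : n - (m:Int) = ((n.toNat - m : Nat) : Int) := by omega
    have hm1 : ((m:Int) + 1) = ((m + 1 : Nat) : Int) := by push_cast; ring
    rw [hnm, hm1, ← Nat.cast_mul, PySem.Int.floordiv_natCast]
    congr 1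
    rw [← Nat.choose_succ_right_eq, Nat.mul_div_cancel _ (by omega)]

theorem combB_eq (n k : Int) (hn : 0 ≤ n) (hk : 0 ≤ k) :
    combB n k = ((n.toNat.choose k.toNat : Nat) : Int) := by
  unfold combB
  by_cases h : n < k
  · rw [if_pos (by simp [h]), Nat.choose_eq_zero_of_lt (by omega)]
    simp
  · rw [if_neg (by simp; omega)]
    have hrange : PySem.List.pyRange 0 k 1 = (List.range k.toNat).map (fun t : Nat => (t : Int)) := by
      rw [PySem.List.pyRange_one, show ((k:Int) - 0).toNat = k.toNat by omega]
      simp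
    rw [hrange, combB_loop n hn k.toNat (by omega)]

-- hockey-stick identity (Int-valued, over Finset.range)
theorem hockeyInt (a j : Nat) : ∀ m : Nat,
    ((a.choose (j+1) : Nat) : Int) + ∑ s ∈ Finset.range m, (((a+s).choose j : Nat) : Int)
      = (((a+m).choose (j+1) : Nat) : Int) := by
  intro m
  induction m with
  | zero => simp
  | succ m ih =>
    rw [Finset.sum_range_succ, ← add_assoc, ih, show a+(m+1) = (a+m)+1 from rfl,
        Nat.choose_succ_succ (a+m) j]
    push_cast
    ring

-- a Python range starting at lo of length `len`, summed after mapping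
theorem pyRange_map_sum (lo hi : Int) (len : Nat) (h : hi - lo = len) (f : Int → Int) :
    ((PySem.List.pyRange lo hi 1).map f).sum = ∑ t ∈ Finset.range len, f (lo + t) := by
  rw [PySem.List.pyRange_one, show (hi - lo).toNat = len by omega, List.map_map]
  rfl

-- invariant of B's incremental loop (c ≥ 0, so the loop starts at t0 = 0): after m steps the
-- state holds the partial sum and the two running binomial coefficients
theorem altB_fold (r c v : Int) (hr : 1 ≤ r) (hrv : 1 ≤ r + v) (hc : 0 ≤ c) :
    ∀ m : Nat,
      ((PySem.List.pyRange 0 ((m : Nat) : Int) 1).foldl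
        (fun st t => (st.1 + (st.2.1 - st.2.2),
          PySem.Int.floordiv (st.2.1 * (r + v - 1 - c - t)) (c + t + 1),
          PySem.Int.floordiv (st.2.2 * (r + t)) (c + t + 1)))
        ((0 : Int), combB (r + v - 1) (c + 0), combB (r + 0 - 1) (c + 0)))
      = (∑ t ∈ Finset.range m,
           ((((r+v-1).toNat.choose (c.toNat + t) : Nat) : Int)
            - ((((r-1).toNat + t).choose (c.toNat + t) : Nat) : Int)),
         (((r+v-1).toNat.choose (c.toNat + m) : Nat) : Int),
         ((((r-1).toNat + m).choose (c.toNat + m) : Nat) : Int)) := by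
  intro m
  induction m with
  | zero =>
    rw [PySem.List.pyRange_one_eq_nil (by omega), List.foldl_nil,
        combB_eq (r+v-1) (c+0) (by omega) (by omega),
        combB_eq (r+0-1) (c+0) (by omega) (by omega),
        show ((c:Int)+0).toNat = c.toNat by omega,
        show ((r:Int)+0-1).toNat = (r-1).toNat by omega]
    simp
  | succ m ih =>
    rw [show (((m+1 : Nat)) : Int) = ((m : Nat) : Int) + 1 by push_cast; ring,
        PySem.List.pyRange_one_succ_right (by omega), List.foldl_append, ih,
        List.foldl_cons, List.foldl_nil]
    refine Prod.ext ?_ (Prod.ext ?_ ?_)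
    · show _ + _ = _
      rw [Finset.sum_range_succ]
    · show PySem.Int.floordiv _ _ = _
      by_cases hbig : (r+v-1).toNat < c.toNat + m
      · rw [Nat.choose_eq_zero_of_lt hbig,
            show ((0:Nat):Int) * (r + v - 1 - c - ((m:Nat):Int)) = (((0:Nat)):Int) by simp,
            show c + ((m:Nat):Int) + 1 = ((c.toNat + m + 1 : Nat) : Int) by omega,
            PySem.Int.floordiv_natCast,
            Nat.choose_eq_zero_of_lt (show (r+v-1).toNat < c.toNat + (m+1) by omega)]
        simp
      · rw [show r + v - 1 - c - ((m:Nat):Int)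
              = (((r+v-1).toNat - (c.toNat + m) : Nat) : Int) by omega,
            show c + ((m:Nat):Int) + 1 = ((c.toNat + m + 1 : Nat) : Int) by omega,
            ← Nat.cast_mul, PySem.Int.floordiv_natCast]
        congr 1
        rw [← Nat.choose_succ_right_eq, Nat.mul_div_cancel _ (by omega)]
        congr 1
    · show PySem.Int.floordiv _ _ = _
      rw [show r + ((m:Nat):Int) = (((r-1).toNat + m + 1 : Nat) : Int) by omega,
          show c + ((m:Nat):Int) + 1 = ((c.toNat + m + 1 : Nat) : Int) by omega,
          ← Nat.cast_mul, PySem.Int.floordiv_natCast]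
      congr 1
      rw [mul_comm, show (r-1).toNat + m + 1 = ((r-1).toNat + m) + 1 from rfl,
          Nat.add_one_mul_choose_eq, Nat.mul_div_cancel _ (by omega)]
      congr 1

-- B's value as the list of hockey-stick differences, for c ≥ 0
theorem altB_eq (r c v : Int) (hr : 1 ≤ r) (hrv : 1 ≤ r + v) (hc : 0 ≤ c) (hv : 0 ≤ v) :
    solution_alt r c v
      = ∑ t ∈ Finset.range v.toNat,
          ((((r+v-1).toNat.choose (c.toNat + t) : Nat) : Int)
           - ((((r-1).toNat + t).choose (c.toNat + t) : Nat) : Int)) := by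
  show ((PySem.List.pyRange (if 0 ≤ c then 0 else (if -c < v then -c else v)) v 1).foldl
          (fun st t => (st.1 + (st.2.1 - st.2.2),
            PySem.Int.floordiv (st.2.1 * (r + v - 1 - c - t)) (c + t + 1),
            PySem.Int.floordiv (st.2.2 * (r + t)) (c + t + 1)))
          (0, combB (r + v - 1) (c + (if 0 ≤ c then 0 else (if -c < v then -c else v))),
              combB (r + (if 0 ≤ c then 0 else (if -c < v then -c else v)) - 1) (c + (if 0 ≤ c then 0 else (if -c < v then -c else v))))).1
    = _
  rw [if_pos hc]
  have hfold := altB_fold r c v hr hrv hc v.toNat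
  rw [show ((v.toNat : Nat) : Int) = v by omega] at hfold
  rw [hfold]

-- the core identity: triangular sum of binomials = hockey-stick differences per column
theorem coreId (a b V : Nat) :
    ∑ k ∈ Finset.range V, ∑ t ∈ Finset.range (k+1), (((a+k).choose (b+t) : Nat) : Int)
      = ∑ t ∈ Finset.range V,
          ((((a+V).choose (b+t+1) : Nat) : Int) - (((a+t).choose (b+t+1) : Nat) : Int)) := by
  have hcol : ∀ t ∈ Finset.range V,
      ((((a+V).choose (b+t+1) : Nat) : Int) - (((a+t).choose (b+t+1) : Nat) : Int))
        = ∑ k ∈ Finset.Ico t V, (((a+k).choose (b+t) : Nat) : Int) := by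
    intro t ht
    rw [Finset.mem_range] at ht
    have hh := hockeyInt (a+t) (b+t) (V - t)
    rw [show a + t + (V - t) = a + V by omega] at hh
    rw [← hh, Finset.sum_Ico_eq_sum_range]
    have hsh : ∀ s ∈ Finset.range (V - t), (((a+(t+s)).choose (b+t) : Nat) : Int)
        = (((a+t+s).choose (b+t) : Nat) : Int) := by
      intro s _
      rw [show a + (t+s) = a + t + s by omega]
    rw [Finset.sum_congr rfl hsh]
    ring
  rw [Finset.sum_congr rfl hcol, Finset.range_eq_Ico,
      Finset.sum_Ico_Ico_comm 0 V (fun t k => (((a+k).choose (b+t) : Nat) : Int))]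

theorem solution_spec' (r c v : Int) (hp : Pre_solution r c v) (hnd : ¬ D_solution r c v) :
    solution r c v = solution_alt r c v := by
  have hp' : (v ≤ 0 ∧ 1 ≤ r + v) ∨ (1 ≤ r ∧ 1 ≤ v ∧ 0 ≤ c ∧ c ≤ r + 1) := by
    unfold Pre_solution at hp
    unfold D_solution at hnd
    rcases hp with h | h
    · exact Or.inl h
    · right
      refine ⟨?_, h.1, ?_, h.2.2.2.2⟩ <;> (by_contra hx; exact hnd ⟨h.1, h.2.1, h.2.2.1, h.2.2.2.1, h.2.2.2.2, by omega⟩)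
  clear hp hnd
  rcases hp' with ⟨hv0, hrv⟩ | ⟨hr, hv1, hc0, hcr⟩
  · -- v ≤ 0: the region is empty, both loops run zero times and return 0
    show (PySem.List.pyRange (r-1) (r-1+v) 1).foldl (fun acc i =>
        (PySem.List.pyRange (c-1) (c-1 + (i-(r-1)) + 1) 1).foldl (fun acc j =>
          acc + PySem.List.pyGetD (PySem.List.pyGetD (pascalBuild r v) i []) j 0) acc) 0
      = ((PySem.List.pyRange (if 0 ≤ c then 0 else (if -c < v then -c else v)) v 1).foldl
          (fun st t => (st.1 + (st.2.1 - st.2.2),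
            PySem.Int.floordiv (st.2.1 * (r + v - 1 - c - t)) (c + t + 1),
            PySem.Int.floordiv (st.2.2 * (r + t)) (c + t + 1)))
          (0, combB (r + v - 1) (c + (if 0 ≤ c then 0 else (if -c < v then -c else v))),
              combB (r + (if 0 ≤ c then 0 else (if -c < v then -c else v)) - 1) (c + (if 0 ≤ c then 0 else (if -c < v then -c else v))))).1
    rw [PySem.List.pyRange_one_eq_nil (by omega),
        PySem.List.pyRange_one_eq_nil (show v ≤ (if 0 ≤ c then 0 else (if -c < v then -c else v)) by split_ifs <;> omega)]
    rfl
  set a := (r-1).toNat with ha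
  set V := v.toNat with hV
  have hn : (r + v).toNat = a + V + 1 := by omega
  have h1 : 1 ≤ r + v := by omega
  have hV1 : 1 ≤ V := by omega
  -- both programs as Finset sums
  have hA : solution r c v
      = ∑ k ∈ Finset.range V, ∑ t ∈ Finset.range (k+1),
          PySem.List.pyGetD (PySem.List.pyGetD (pascalBuild r v) (r - 1 + (k:Int)) [])
            (c - 1 + (t:Int)) 0 := by
    show (PySem.List.pyRange (r-1) (r-1+v) 1).foldl (fun acc i =>
        (PySem.List.pyRange (c-1) (c-1 + (i-(r-1)) + 1) 1).foldl (fun acc j =>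
          acc + PySem.List.pyGetD (PySem.List.pyGetD (pascalBuild r v) i []) j 0) acc) 0 = _
    simp only [PySem.List.foldl_add]
    rw [pyRange_map_sum (r-1) (r-1+v) V (by omega), zero_add]
    apply Finset.sum_congr rfl
    intro k hk
    rw [pyRange_map_sum (c-1) (c - 1 + (r - 1 + (k:Int) - (r - 1)) + 1) (k+1) (by push_cast; omega)]
  rcases eq_or_lt_of_le hc0 with hc0' | hc1
  · -- c = 0: Python's wrapped column -1 reads only zeros; both sides reduce to the
    -- (r+1, 1, v-1) instance of the core identity
    have hc : c = 0 := hc0'.symm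
    subst hc
    have hA0 : solution r 0 v
        = ∑ k ∈ Finset.range V, ∑ t ∈ Finset.range k, (((a+k).choose t : Nat) : Int) := by
      rw [hA]
      apply Finset.sum_congr rfl
      intro k hk
      rw [Finset.mem_range] at hk
      rw [Finset.sum_range_succ']
      have h0 : PySem.List.pyGetD
          (PySem.List.pyGetD (pascalBuild r v) (r - 1 + (k:Int)) []) (0 - 1 + ((0:Nat):Int)) 0
          = 0 := by
        rw [show (0:Int) - 1 + ((0:Nat):Int) = -1 by norm_num]
        exact pascalBuild_cell_neg1 r v h1 (r - 1 + (k:Int)) (by omega) (by omega)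
      rw [h0, add_zero]
      apply Finset.sum_congr rfl
      intro t ht
      rw [Finset.mem_range] at ht
      rw [show (0:Int) - 1 + ((t+1:Nat):Int) = (t:Int) by push_cast; ring]
      rw [pascalBuild_cell r v h1 _ _ (by omega) (by omega) (by omega) (by omega),
          show (r - 1 + (k:Int)).toNat = a + k by omega, Int.toNat_natCast]
    have hB0 : solution_alt r 0 v
        = ∑ t ∈ Finset.range V,
            ((((a+V).choose t : Nat) : Int) - (((a+t).choose t : Nat) : Int)) := by
      rw [altB_eq r 0 v hr (by omega) (by omega) (by omega), ← hV]
      apply Finset.sum_congr rfl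
      intro t ht
      rw [show (r+v-1).toNat = a + V by omega,
          show ((0:Int)).toNat + t = t by omega,
          show (r-1).toNat + t = a + t by omega]
    rw [hA0, hB0]
    rw [show V = (V-1)+1 by omega, Finset.sum_range_succ', Finset.sum_range_succ']
    simp only [Finset.range_zero, Finset.sum_empty, add_zero,
               Nat.choose_zero_right, Nat.cast_one, sub_self]
    have hco := coreId (a+1) 0 (V-1)
    simp only [Nat.zero_add, show ∀ x : Nat, a+1+x = a+(x+1) from fun x => by omega] at hco
    exact hco
  · -- 1 ≤ c: every read is a plain in-range cell C(i, j)
    set b := (c-1).toNat with hb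
    have hA1 : solution r c v
        = ∑ k ∈ Finset.range V, ∑ t ∈ Finset.range (k+1), (((a+k).choose (b+t) : Nat) : Int) := by
      rw [hA]
      apply Finset.sum_congr rfl
      intro k hk
      rw [Finset.mem_range] at hk
      apply Finset.sum_congr rfl
      intro t ht
      rw [Finset.mem_range] at ht
      rw [pascalBuild_cell r v h1 _ _ (by omega) (by omega) (by omega) (by omega),
          show (r - 1 + (k:Int)).toNat = a + k by omega,
          show (c - 1 + (t:Int)).toNat = b + t by omega]
    have hB1 : solution_alt r c v
        = ∑ t ∈ Finset.range V,
            ((((a+V).choose (b+t+1) : Nat) : Int) - (((a+t).choose (b+t+1) : Nat) : Int)) := by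
      rw [altB_eq r c v hr (by omega) (by omega) (by omega), ← hV]
      apply Finset.sum_congr rfl
      intro t ht
      rw [show (r+v-1).toNat = a + V by omega,
          show c.toNat + t = b + t + 1 by omega,
          show (r-1).toNat + t = a + t by omega]
    rw [hA1, hB1]
    exact coreId a b V

-- ===== VERDICT (by name: the statement is the Claim_ definition above) =====
theorem solution_spec : Claim_unchanged_solution := by
  intro r c v _ hp hnd
  exact solution_spec' r c v hp hnd

theorem solution_changed : Claim_changed_solution := by
  unfold Claim_changed_solution
  decide
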